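-- pv_equiv track=rewrite | github.com/s-jinipark/pythonTest | COS_Lvl2/St2-1/D1/InitArray06.py | solution
-- ===== SOURCE A (Python) =====
-- def solution(row, col):
--     result = [[0 for _ in range(col)] for _ in range(row)]
--     num = 1
--
--     for r in range(row - 1, -1, -1):
--         if (row % 2 == 1 and r % 2 == 0) or (row % 2 == 0 and r % 2 == 1):
--             for c in range(col - 1, -1, -1):
--                 result[r][c] = num
--                 num+=1
--
--         else:
--             for c in range(0, col):
--                 result[r][c] = num
--                 num+=1
--
--     return result
-- ===== SOURCE B (Python) =====
-- def solution(row, col):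
--     # closed form, no mutable grid / running counter: row k (counting k = row-1-r
--     # from the bottom, which is filled first) holds k*col+1 .. k*col+col, written
--     # right-to-left when k is even and left-to-right when k is odd.
--     return [list(range(k * col + col, k * col, -1)) if k % 2 == 0
--             else list(range(k * col + 1, k * col + col + 1))
--             for k in range(row - 1, -1, -1)]
-- ===== Notes on version B (the rewrite author's own statement) =====
-- stated objective: simpler
-- what changed: Replaces the mutable zero grid, running counter and direction-switching in-place fill loops with a single comprehension that emits each row in closed form as one range (descending for even k = row-1-r, ascending for odd k).
import Mathlib
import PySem

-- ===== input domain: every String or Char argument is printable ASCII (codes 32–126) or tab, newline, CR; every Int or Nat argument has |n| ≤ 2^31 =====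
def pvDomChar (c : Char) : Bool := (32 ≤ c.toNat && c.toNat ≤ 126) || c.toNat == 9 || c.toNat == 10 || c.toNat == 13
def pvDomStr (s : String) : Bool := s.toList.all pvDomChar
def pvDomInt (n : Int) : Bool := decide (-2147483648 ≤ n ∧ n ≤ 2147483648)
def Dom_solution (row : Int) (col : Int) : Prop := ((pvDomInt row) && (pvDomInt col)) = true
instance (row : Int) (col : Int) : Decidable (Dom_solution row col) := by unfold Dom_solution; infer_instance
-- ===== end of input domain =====

-- B replaces A's mutable grid, running counter and direction-switching reverse loops
-- with a double comprehension computing each cell from its coordinates (objective: simpler).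

-- ===== PORT A =====
-- `result[r][c] = num` is ported as fetching row r, setting index c, writing the row back
-- (pyGetD/pySetD are exact here: r and c always come from ranges inside the grid's bounds).
def solution (row : Int) (col : Int) : List (List Int) :=
  let result := (PySem.List.pyRange 0 row 1).map (fun _ =>
    (PySem.List.pyRange 0 col 1).map (fun _ => (0 : Int)))
  let st := (PySem.List.pyRange (row - 1) (-1) (-1)).foldl
    (fun (st : List (List Int) × Int) r =>
      if (PySem.Int.mod row 2 == 1 && PySem.Int.mod r 2 == 0)
          || (PySem.Int.mod row 2 == 0 && PySem.Int.mod r 2 == 1) then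
        (PySem.List.pyRange (col - 1) (-1) (-1)).foldl
          (fun st c =>
            (PySem.List.pySetD st.1 r (PySem.List.pySetD (PySem.List.pyGetD st.1 r []) c st.2),
             st.2 + 1)) st
      else
        (PySem.List.pyRange 0 col 1).foldl
          (fun st c =>
            (PySem.List.pySetD st.1 r (PySem.List.pySetD (PySem.List.pyGetD st.1 r []) c st.2),
             st.2 + 1)) st)
    (result, 1)
  st.1

-- ===== PORT B =====
def solution_alt (row : Int) (col : Int) : List (List Int) :=
  (PySem.List.pyRange (row - 1) (-1) (-1)).map (fun k =>
    if PySem.Int.mod k 2 == 0 then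
      PySem.List.pyRange (k * col + col) (k * col) (-1)
    else
      PySem.List.pyRange (k * col + 1) (k * col + col + 1) 1)

-- ===== PRECONDITION & SPEC =====
def Spec_solution (row : Int) (col : Int) (out : List (List Int)) : Prop := out = solution_alt row col
instance (row : Int) (col : Int) (out : List (List Int)) : Decidable (Spec_solution row col out) := by unfold Spec_solution; infer_instance

-- ===== CLAIM (what is proved, stated in full; the proofs are below) =====
def Claim_equal_solution : Prop := ∀ (row : Int) (col : Int), Dom_solution row col → Spec_solution row col (solution row col)

-- ===== LEMMAS AND PROOFS =====

-- the column step of A, on (grid, counter) state, writing into row r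
def colStep (r : Int) (st : List (List Int) × Int) (c : Int) : List (List Int) × Int :=
  (PySem.List.pySetD st.1 r (PySem.List.pySetD (PySem.List.pyGetD st.1 r []) c st.2), st.2 + 1)

-- the same step acting on the single row being written
def rowStep (st : List Int × Int) (c : Int) : List Int × Int :=
  (PySem.List.pySetD st.1 c st.2, st.2 + 1)

-- B's value at cell (r, c)
def valB (row col r c : Int) : Int :=
  (row - 1 - r) * col + 1 + (if PySem.Int.mod (row - 1 - r) 2 == 0 then col - 1 - c else c)

-- B's grid, over Nat indices
def gridB (row col : Int) : List (List Int) :=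
  (List.range row.toNat).map (fun rk : Nat =>
    (List.range col.toNat).map (fun ck : Nat => valB row col rk ck))

-- the zero grid A starts from
def zeros (row col : Int) : List (List Int) :=
  (List.range row.toNat).map (fun _ => (List.range col.toNat).map (fun _ => (0 : Int)))

lemma alt_eq_gridB (row col : Int) : solution_alt row col = gridB row col := by
  unfold solution_alt gridB
  rw [PySem.List.pyRange_neg_one, show (row - 1 - (-1 : Int)).toNat = row.toNat by omega,
    List.map_map]
  apply List.map_congr_left; intro rk _
  simp only [Function.comp]
  by_cases hpar : (PySem.Int.mod (row - 1 - (rk : Int)) 2 == 0) = true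
  · rw [if_pos hpar, PySem.List.pyRange_neg_one,
      show (row - 1 - (rk : Int)) * col + col - (row - 1 - (rk : Int)) * col = col by ring]
    apply List.map_congr_left; intro i _
    simp only [valB, if_pos hpar]
    ring
  · rw [if_neg hpar, PySem.List.pyRange_one,
      show (row - 1 - (rk : Int)) * col + col + 1 - ((row - 1 - (rk : Int)) * col + 1) = col by ring]
    apply List.map_congr_left; intro i _
    simp only [valB, if_neg hpar]

-- a column fold only rewrites row r of the grid
lemma colStep_foldl_split (r : Int) (h0 : 0 ≤ r) (cs : List Int) :
    ∀ (res : List (List Int)) (num : Int), r.toNat < res.length →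
    cs.foldl (colStep r) (res, num)
      = (res.set r.toNat (cs.foldl rowStep (res.getD r.toNat [], num)).1, num + cs.length) := by
  induction cs with
  | nil =>
      intro res num hr
      simp only [List.foldl_nil, List.length_nil, Nat.cast_zero, add_zero]
      rw [List.getD_eq_getElem _ _ hr, List.set_getElem_self]
  | cons c cs ih =>
      intro res num hr
      have hstep : colStep r (res, num) c
          = (res.set r.toNat (PySem.List.pySetD (res.getD r.toNat []) c num), num + 1) := by
        simp [colStep, PySem.List.pySetD_of_nonneg _ _ h0, PySem.List.pyGetD_of_nonneg _ _ h0]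
      rw [List.foldl_cons, hstep, ih _ _ (by simpa using hr)]
      have hg : (res.set r.toNat (PySem.List.pySetD (res.getD r.toNat []) c num)).getD r.toNat []
          = PySem.List.pySetD (res.getD r.toNat []) c num := by
        rw [List.getD_eq_getElem _ _ (by simpa using hr)]
        exact List.getElem_set_self _
      rw [hg, List.set_set, List.foldl_cons,
        show rowStep (res.getD r.toNat [], num) c
          = (PySem.List.pySetD (res.getD r.toNat []) c num, num + 1) from rfl]
      refine Prod.ext rfl ?_
      simp only [List.length_cons]
      push_cast; ring

-- left-to-right fill: positions 0..n-1 get num, num+1, …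
lemma rowfold_left (n : Nat) (rowv : List Int) (num : Int) (h : n ≤ rowv.length) :
    (((List.range n).map (fun k : Nat => (k : Int))).foldl rowStep (rowv, num))
      = ((List.range n).map (fun k : Nat => num + (k : Int)) ++ rowv.drop n, num + n) := by
  induction n with
  | zero => simp
  | succ n ih =>
      rw [List.range_succ, List.map_append, List.foldl_append, ih (by omega)]
      have hn : n < rowv.length := by omega
      simp only [List.map_cons, List.map_nil, List.foldl_cons, List.foldl_nil, rowStep]
      rw [PySem.List.pySetD_of_nonneg _ _ (by positivity), Int.toNat_natCast,
        List.set_append, if_neg (by simp), List.length_map, List.length_range,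
        Nat.sub_self, List.drop_eq_getElem_cons hn, List.set_cons_zero,
        List.map_append]
      refine Prod.ext ?_ (by push_cast; ring)
      simp

-- right-to-left fill over positions col-1 … col-n
lemma rowfold_right (col : Int) (n : Nat) (rowv : List Int) (num : Int)
    (hlen : rowv.length = col.toNat) (h : n ≤ col.toNat) :
    (((List.range n).map (fun k : Nat => col - 1 - (k : Int))).foldl rowStep (rowv, num))
      = (rowv.take (col.toNat - n)
          ++ (List.range n).map (fun i : Nat => num + ((n - 1 - i : Nat) : Int)), num + n) := by
  induction n with
  | zero => simp [List.take_of_length_le (le_of_eq hlen)]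
  | succ n ih =>
      have hcol : 0 < col := by omega
      have hcolN : (col.toNat : Int) = col := Int.toNat_of_nonneg (le_of_lt hcol)
      rw [List.range_succ, List.map_append, List.foldl_append, ih (by omega)]
      simp only [List.map_cons, List.map_nil, List.foldl_cons, List.foldl_nil, rowStep]
      have hidx : (col - 1 - (n : Int)).toNat = col.toNat - 1 - n := by omega
      rw [PySem.List.pySetD_of_nonneg _ _ (by omega), hidx,
        List.set_append, if_pos (by
          rw [List.length_take, hlen]; omega)]
      have htake : rowv.take (col.toNat - n)
          = rowv.take (col.toNat - n - 1) ++ (rowv[col.toNat - n - 1]?).toList := by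
        rw [show col.toNat - n = (col.toNat - n - 1) + 1 by omega, List.take_succ]
        simp
      rw [htake, List.getElem?_eq_getElem (by omega), Option.toList_some,
        List.set_append, if_neg (by
          rw [List.length_take, hlen]; omega),
        show col.toNat - 1 - n - (rowv.take (col.toNat - n - 1)).length = 0 by
          rw [List.length_take, hlen]; omega,
        List.set_cons_zero]
      refine Prod.ext ?_ (by push_cast; ring)
      simp only [List.append_assoc, List.singleton_append,
        show col.toNat - (n + 1) = col.toNat - n - 1 from rfl]
      congr 1
      rw [← List.range_succ, List.range_succ_eq_map, List.map_cons, List.map_map]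
      refine List.cons_eq_cons.mpr ⟨by omega, ?_⟩
      apply List.map_congr_left; intro i hi
      simp only [Function.comp]
      omega

-- the branch condition of A is "row - 1 - r is even"
lemma cond_eq (row r : Int) :
    ((PySem.Int.mod row 2 == 1 && PySem.Int.mod r 2 == 0)
      || (PySem.Int.mod row 2 == 0 && PySem.Int.mod r 2 == 1))
      = (PySem.Int.mod (row - 1 - r) 2 == 0) := by
  rw [Bool.eq_iff_iff]
  simp only [Bool.or_eq_true, Bool.and_eq_true, beq_iff_eq,
    PySem.Int.mod_eq_emod_of_pos (by norm_num : (0:Int) < 2)]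
  omega

-- writing the final value of row t into a half-updated grid advances the frontier
lemma set_frontier (zs F : List (List Int)) (t : Nat) (hlen : zs.length = F.length)
    (ht : t < zs.length) :
    (zs.take (t + 1) ++ F.drop (t + 1)).set t (F[t]'(by omega))
      = zs.take t ++ F.drop t := by
  rw [List.set_append, if_pos (by rw [List.length_take]; omega),
    List.take_succ, List.getElem?_eq_getElem ht,
    List.set_append, if_neg (by rw [List.length_take]; omega),
    show t - (zs.take t).length = 0 by rw [List.length_take]; omega]
  simp only [Option.toList_some, List.set_cons_zero]
  rw [List.drop_eq_getElem_cons (l := F) (i := t) (by omega)]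
  simp

lemma gridB_getElem (row col : Int) (t : Nat) (ht : t < row.toNat) :
    (gridB row col)[t]'(by simpa [gridB] using ht)
      = (List.range col.toNat).map (fun ck : Nat => valB row col (t : Int) ck) := by
  simp [gridB]

-- outer invariant: after m rows, the bottom m rows carry their final values
lemma outer_invariant (row col : Int) (hrow : 0 < row) (m : Nat) (hm : m ≤ row.toNat) :
    (((List.range m).map (fun k : Nat => row - 1 - (k : Int))).foldl
      (fun (st : List (List Int) × Int) r =>
        if (PySem.Int.mod row 2 == 1 && PySem.Int.mod r 2 == 0)
            || (PySem.Int.mod row 2 == 0 && PySem.Int.mod r 2 == 1) then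
          (PySem.List.pyRange (col - 1) (-1) (-1)).foldl (colStep r) st
        else
          (PySem.List.pyRange 0 col 1).foldl (colStep r) st)
      (zeros row col, 1))
      = ((zeros row col).take (row.toNat - m) ++ (gridB row col).drop (row.toNat - m),
         (m : Int) * (col.toNat : Int) + 1) := by
  induction m with
  | zero =>
      have hzlen : (zeros row col).length = row.toNat := by simp [zeros]
      have hFlen : (gridB row col).length = row.toNat := by simp [gridB]
      simp [List.take_of_length_le (le_of_eq hzlen),
        List.drop_of_length_le (le_of_eq hFlen)]
  | succ m ih =>
      have hrowN : (row.toNat : Int) = row := Int.toNat_of_nonneg (by omega)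
      have hr0 : (0:Int) ≤ row - 1 - (m:Int) := by omega
      have hrt : (row - 1 - (m:Int)).toNat = row.toNat - 1 - m := by omega
      have hzlen : (zeros row col).length = row.toNat := by simp [zeros]
      have hFlen : (gridB row col).length = row.toNat := by simp [gridB]
      have hSlen : ((zeros row col).take (row.toNat - m)
          ++ (gridB row col).drop (row.toNat - m)).length = row.toNat := by
        simp only [List.length_append, List.length_take, List.length_drop, hzlen, hFlen]
        omega
      have harg : row - 1 - ((row.toNat - 1 - m : Nat) : Int) = (m : Int) := by omega
      rw [List.range_succ, List.map_append, List.foldl_append, ih (by omega)]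
      simp only [List.map_cons, List.map_nil, List.foldl_cons, List.foldl_nil]
      rw [cond_eq, show row - 1 - (row - 1 - (m:Int)) = (m:Int) by ring]
      have hgetD : ((zeros row col).take (row.toNat - m)
            ++ (gridB row col).drop (row.toNat - m)).getD ((row - 1 - (m:Int)).toNat) []
          = (List.range col.toNat).map (fun _ => (0 : Int)) := by
        rw [hrt, List.getD_eq_getElem _ _ (by rw [hSlen]; omega),
          List.getElem_append_left (by
            simp only [List.length_take, hzlen]; omega)]
        rw [List.getElem_take]
        simp [zeros]
      have hset : ∀ (v : List Int) (hv : v = (gridB row col)[row.toNat - 1 - m]'(by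
            rw [hFlen]; omega)) (num : Int),
          ((((zeros row col).take (row.toNat - m)
            ++ (gridB row col).drop (row.toNat - m)).set (row.toNat - 1 - m) v), num)
          = ((zeros row col).take (row.toNat - (m + 1))
              ++ (gridB row col).drop (row.toNat - (m + 1)), num) := by
        intro v hv num
        subst hv
        rw [show row.toNat - (m + 1) = row.toNat - 1 - m by omega,
          show row.toNat - m = (row.toNat - 1 - m) + 1 by omega]
        exact Prod.ext (set_frontier _ _ _ (by omega) (by omega)) rfl
      rcases Nat.even_or_odd m with he | ho
      · -- m even: the row is written right-to-left
        obtain ⟨j, hj⟩ := he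
        have hmod : PySem.Int.mod (m:Int) 2 = 0 := by
          rw [PySem.Int.mod_eq_emod_of_pos (by norm_num : (0:Int) < 2)]; omega
        rw [if_pos (by rw [hmod]; rfl)]
        rw [PySem.List.pyRange_neg_one,
          show (col - 1 - (-1 : Int)).toNat = col.toNat by omega]
        rw [colStep_foldl_split _ hr0 _ _ _ (by rw [hSlen, hrt]; omega), hgetD,
          rowfold_right col col.toNat _ _ (by simp) (le_refl _)]
        simp only [Nat.sub_self, List.take_zero, List.nil_append,
          List.length_map, List.length_range, hrt]
        have hFt : (List.range col.toNat).map
              (fun i : Nat => ((m:Int) * (col.toNat:Int) + 1) + ((col.toNat - 1 - i : Nat) : Int))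
            = (gridB row col)[row.toNat - 1 - m]'(by rw [hFlen]; omega) := by
          rw [gridB_getElem row col _ (by omega)]
          apply List.map_congr_left; intro i hi
          have hcol : 0 < col := by
            have := List.mem_range.mp hi; omega
          have hcolN : ((col.toNat : Int)) = col := Int.toNat_of_nonneg (le_of_lt hcol)
          have hi' := List.mem_range.mp hi
          simp only [valB, harg, hmod, beq_self_eq_true, if_true]
          rw [hcolN]
          congr 1
          omega
        rw [hset _ hFt]
        refine Prod.ext rfl ?_
        push_cast; ring
      · -- m odd: the row is written left-to-right
        obtain ⟨j, hj⟩ := ho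
        have hmod : PySem.Int.mod (m:Int) 2 = 1 := by
          rw [PySem.Int.mod_eq_emod_of_pos (by norm_num : (0:Int) < 2)]; omega
        rw [if_neg (by rw [hmod]; decide)]
        rw [PySem.List.pyRange_one, sub_zero,
          show (fun k : Nat => (0:Int) + (k : Int)) = (fun k : Nat => (k : Int)) by
            funext k; omega]
        rw [colStep_foldl_split _ hr0 _ _ _ (by rw [hSlen, hrt]; omega), hgetD,
          rowfold_left col.toNat _ _ (by simp)]
        simp only [List.drop_of_length_le (le_of_eq (by simp :
            ((List.range col.toNat).map (fun _ => (0:Int))).length = col.toNat)),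
          List.append_nil, List.length_map, List.length_range, hrt]
        have hFt : (List.range col.toNat).map
              (fun k : Nat => ((m:Int) * (col.toNat:Int) + 1) + (k : Int))
            = (gridB row col)[row.toNat - 1 - m]'(by rw [hFlen]; omega) := by
          rw [gridB_getElem row col _ (by omega)]
          apply List.map_congr_left; intro i hi
          have hcol : 0 < col := by
            have := List.mem_range.mp hi; omega
          have hcolN : ((col.toNat : Int)) = col := Int.toNat_of_nonneg (le_of_lt hcol)
          simp only [valB, harg, hmod]
          rw [if_neg (by decide), hcolN]
        rw [hset _ hFt]
        refine Prod.ext rfl ?_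
        push_cast; ring

-- ===== VERDICT (by name: the statement is the Claim_ definition above) =====
theorem solution_spec : Claim_equal_solution := by
  intro row col _
  unfold Spec_solution
  rw [alt_eq_gridB]
  have hsol : solution row col
      = ((PySem.List.pyRange (row - 1) (-1) (-1)).foldl
          (fun (st : List (List Int) × Int) r =>
            if (PySem.Int.mod row 2 == 1 && PySem.Int.mod r 2 == 0)
                || (PySem.Int.mod row 2 == 0 && PySem.Int.mod r 2 == 1) then
              (PySem.List.pyRange (col - 1) (-1) (-1)).foldl (colStep r) st
            else
              (PySem.List.pyRange 0 col 1).foldl (colStep r) st)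
          ((PySem.List.pyRange 0 row 1).map (fun _ =>
            (PySem.List.pyRange 0 col 1).map (fun _ => (0 : Int))), 1)).1 := rfl
  by_cases hrow : 0 < row
  · have hzeros : (PySem.List.pyRange 0 row 1).map (fun _ =>
          (PySem.List.pyRange 0 col 1).map (fun _ => (0 : Int))) = zeros row col := by
      simp only [zeros, PySem.List.pyRange_one, List.map_map, sub_zero]
      rfl
    have hrange : PySem.List.pyRange (row - 1) (-1) (-1)
        = (List.range row.toNat).map (fun k : Nat => row - 1 - (k : Int)) := by
      rw [PySem.List.pyRange_neg_one, show (row - 1 - (-1 : Int)).toNat = row.toNat by omega]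
    rw [hsol, hzeros, hrange, outer_invariant row col hrow row.toNat (le_refl _)]
    simp
  · rw [hsol, PySem.List.pyRange_neg_one_eq_nil (show row - 1 ≤ -1 by omega),
      PySem.List.pyRange_one_eq_nil (show row ≤ 0 by omega)]
    simp [gridB, show row.toNat = 0 by omega]
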